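-- pv_equiv track=rewrite | github.com/pangeran-bottor/coding_challenges | codechef/june_challenge_2020_div_2/5.py | solve
-- ===== SOURCE A (Python) =====
-- def solve(N):
--     l = [i for i in range(1, N*N+1)]
--     m = [[0]*N for _ in range(N)]
--     l_pos, m_pos = 0, 0
--     while m_pos < N:
--         r = 0
--         while r <= m_pos:
--             m[r][m_pos] = l[l_pos]
--             l_pos += 1
--             r += 1
--         c = m_pos-1
--         while c >= 0:
--             m[m_pos][c] = l[l_pos]
--             l_pos += 1
--             c -= 1
--         m_pos += 1
--     return m
-- ===== SOURCE B (Python) =====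
-- def solve(N):
--     return [[c * c + r + 1 if c >= r else r * r + 2 * r + 1 - c
--              for c in range(N)]
--             for r in range(N)]
-- ===== Notes on version B (the rewrite author's own statement) =====
-- stated objective: simpler
-- what changed: Replaces the prebuilt 1..N*N list, the running counter and the per-layer L-shaped fill loops by a single row-major comprehension computing each cell independently from a closed form based on its layer k = max(r,c).
import Mathlib
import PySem

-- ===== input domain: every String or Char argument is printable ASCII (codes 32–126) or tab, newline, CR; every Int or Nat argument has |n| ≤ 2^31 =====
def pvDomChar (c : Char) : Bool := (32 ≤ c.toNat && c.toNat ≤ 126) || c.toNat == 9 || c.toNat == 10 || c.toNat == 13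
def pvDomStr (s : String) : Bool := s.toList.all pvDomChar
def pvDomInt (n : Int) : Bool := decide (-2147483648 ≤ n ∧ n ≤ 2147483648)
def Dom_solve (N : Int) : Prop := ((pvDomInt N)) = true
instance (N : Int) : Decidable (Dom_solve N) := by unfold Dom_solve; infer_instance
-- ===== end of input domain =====

-- B replaces A's sequential L-shaped layer fill (prebuilt list + running counter) by a
-- row-major comprehension with an independent closed-form value per cell: objective "simpler".

-- ===== PORT A =====
-- m[r][c] = v  (functional update of the nested list)
def setCell (m : List (List Int)) (r c : Nat) (v : Int) : List (List Int) :=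
  m.set r ((m.getD r []).set c v)

-- inner while 'r <= m_pos' (fills column m_pos, rows r..m_pos)
def solveLoopR (l : List Int) (mpos r : Nat) (m : List (List Int)) (lpos : Nat) :
    List (List Int) × Nat :=
  if r ≤ mpos then
    solveLoopR l mpos (r + 1) (setCell m r mpos (PySem.List.pyGetD l (lpos : Int) 0)) (lpos + 1)
  else (m, lpos)
  termination_by mpos + 1 - r
  decreasing_by omega

-- inner while 'c >= 0' (fills row m_pos, columns m_pos-1 down to 0)
def solveLoopC (l : List Int) (mpos : Nat) (c : Int) (m : List (List Int)) (lpos : Nat) :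
    List (List Int) × Nat :=
  if 0 ≤ c then
    solveLoopC l mpos (c - 1) (setCell m mpos c.toNat (PySem.List.pyGetD l (lpos : Int) 0)) (lpos + 1)
  else (m, lpos)
  termination_by (c + 1).toNat
  decreasing_by omega

-- outer while 'm_pos < N'
def solveLoopM (N : Int) (l : List Int) (mpos : Nat) (m : List (List Int)) (lpos : Nat) :
    List (List Int) :=
  if (mpos : Int) < N then
    let p1 := solveLoopR l mpos 0 m lpos
    let p2 := solveLoopC l mpos ((mpos : Int) - 1) p1.1 p1.2
    solveLoopM N l (mpos + 1) p2.1 p2.2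
  else m
  termination_by (N - mpos).toNat
  decreasing_by omega

def solve (N : Int) : List (List Int) :=
  let l := PySem.List.pyRange 1 (N * N + 1) 1
  let m := List.replicate N.toNat (List.replicate N.toNat (0 : Int))
  solveLoopM N l 0 m 0

-- ===== PORT B =====
def solve_alt (N : Int) : List (List Int) :=
  (PySem.List.pyRange 0 N 1).map (fun r =>
    (PySem.List.pyRange 0 N 1).map (fun c =>
      if r ≤ c then c * c + r + 1 else r * r + 2 * r + 1 - c))

-- ===== PRECONDITION & SPEC =====
def Spec_solve (N : Int) (out : List (List Int)) : Prop := out = solve_alt N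
instance (N : Int) (out : List (List Int)) : Decidable (Spec_solve N out) := by unfold Spec_solve; infer_instance

-- ===== CLAIM (what is proved, stated in full; the proofs are below) =====
def Claim_equal_solve : Prop := ∀ (N : Int), Dom_solve N → Spec_solve N (solve N)

-- ===== LEMMAS AND PROOFS =====

-- matrix generated by a cell function
def mkMat (n : Nat) (g : Nat → Nat → Int) : List (List Int) :=
  (List.range n).map (fun r => (List.range n).map (g r))

-- the closed-form cell value
def fform (i j : Nat) : Int :=
  if i ≤ j then (j : Int) * j + i + 1 else (i : Int) * i + 2 * i + 1 - j

theorem mkMat_congr {n : Nat} {g g' : Nat → Nat → Int}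
    (h : ∀ i < n, ∀ j < n, g i j = g' i j) : mkMat n g = mkMat n g' := by
  unfold mkMat
  refine List.map_congr_left ?_
  intro i hi
  refine List.map_congr_left ?_
  intro j hj
  exact h i (List.mem_range.mp hi) j (List.mem_range.mp hj)

theorem setCell_mkMat {n r c : Nat} (hr : r < n) (_hc : c < n) (g : Nat → Nat → Int) (v : Int) :
    setCell (mkMat n g) r c v = mkMat n (fun i j => if i = r ∧ j = c then v else g i j) := by
  unfold setCell mkMat
  have hgetD : ((List.range n).map (fun r => (List.range n).map (g r))).getD r [] =
      (List.range n).map (g r) := by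
    rw [List.getD_eq_getElem _ _ (by simpa using hr)]
    simp
  rw [hgetD]
  apply List.ext_getElem
  · simp
  · intro i h1 h2
    have hi : i < n := by simpa using h2
    simp only [List.getElem_set, List.getElem_map, List.getElem_range]
    split_ifs with h
    · subst h
      apply List.ext_getElem
      · simp
      · intro j h3 h4
        have hj : j < n := by simpa using h4
        simp only [List.getElem_set, List.getElem_map, List.getElem_range]
        split_ifs with ha hb hb
        · rfl
        · exact absurd ⟨trivial, ha.symm⟩ hb
        · exact absurd hb.2.symm ha
        · rfl
    · apply List.ext_getElem
      · simp
      · intro j h3 h4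
        simp only [List.getElem_map, List.getElem_range]
        rw [if_neg (by tauto)]

theorem replicate_eq_mkMat (n : Nat) :
    List.replicate n (List.replicate n (0 : Int)) = mkMat n (fun _ _ => 0) := by
  unfold mkMat
  rw [List.map_const', List.length_range]
  congr 1
  rw [List.map_const', List.length_range]

theorem lget {N : Int} (hN : 0 < N) {k : Nat} (hk : k < N.toNat * N.toNat) :
    PySem.List.pyGetD (PySem.List.pyRange 1 (N * N + 1) 1) (k : Int) 0 = (k : Int) + 1 := by
  rw [PySem.List.pyRange_one]
  have hNN : (N * N + 1 - 1).toNat = N.toNat * N.toNat := by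
    rcases Int.eq_ofNat_of_zero_le (le_of_lt hN) with ⟨n, rfl⟩
    have h1 : (n : Int) * n + 1 - 1 = ((n * n : Nat) : Int) := by push_cast; ring
    rw [h1, Int.toNat_natCast, Int.toNat_natCast]
  rw [hNN, PySem.List.pyGetD_natCast]
  rw [List.getD_eq_getElem _ _ (by simpa using hk)]
  simp only [List.getElem_map, List.getElem_range]
  omega

theorem loopR_spec {N : Int} (hN : 0 < N) {n : Nat} (hn : n = N.toNat)
    {mpos : Nat} (hm : mpos < n) :
    ∀ (d r0 : Nat) (g : Nat → Nat → Int), r0 + d = mpos + 1 →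
      solveLoopR (PySem.List.pyRange 1 (N * N + 1) 1) mpos r0 (mkMat n g) (mpos * mpos + r0) =
        (mkMat n (fun i j => if r0 ≤ i ∧ i ≤ mpos ∧ j = mpos then (mpos : Int) * mpos + i + 1 else g i j),
          mpos * mpos + mpos + 1) := by
  intro d
  induction d with
  | zero =>
    intro r0 g hd
    rw [solveLoopR]
    rw [if_neg (by omega)]
    have : r0 = mpos + 1 := by omega
    subst this
    refine Prod.ext ?_ (by omega)
    exact (mkMat_congr (by intro i hi j hj; rw [if_neg (by omega)])).symm
  | succ d ih =>
    intro r0 g hd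
    rw [solveLoopR, if_pos (by omega)]
    have hval : PySem.List.pyGetD (PySem.List.pyRange 1 (N * N + 1) 1)
        ((mpos * mpos + r0 : Nat) : Int) 0 = ((mpos * mpos + r0 : Nat) : Int) + 1 :=
      lget hN (by
        subst hn
        have key : (mpos + 1) * (mpos + 1) ≤ N.toNat * N.toNat :=
          Nat.mul_le_mul (by omega) (by omega)
        have e : (mpos + 1) * (mpos + 1) = mpos * mpos + 2 * mpos + 1 := by ring
        omega)
    rw [hval,
      setCell_mkMat (by omega) (by omega)]
    have harith : mpos * mpos + r0 + 1 = mpos * mpos + (r0 + 1) := by omega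
    rw [harith, ih (r0 + 1) _ (by omega)]
    refine Prod.ext ?_ rfl
    apply mkMat_congr
    intro i hi j hj
    by_cases h1 : r0 + 1 ≤ i ∧ i ≤ mpos ∧ j = mpos
    · rw [if_pos h1, if_pos (by omega)]
    · rw [if_neg h1]
      by_cases h2 : i = r0 ∧ j = mpos
      · rw [if_pos h2, if_pos (by omega)]
        obtain ⟨rfl, rfl⟩ := h2
        push_cast; ring
      · rw [if_neg h2, if_neg (by omega)]

theorem loopC_spec {N : Int} (hN : 0 < N) {n : Nat} (hn : n = N.toNat)
    {mpos : Nat} (hm : mpos < n) :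
    ∀ (d : Nat), d ≤ mpos → ∀ (g : Nat → Nat → Int),
      solveLoopC (PySem.List.pyRange 1 (N * N + 1) 1) mpos ((d : Int) - 1) (mkMat n g)
          (mpos * mpos + mpos + 1 + (mpos - d)) =
        (mkMat n (fun i j => if i = mpos ∧ (j : Int) ≤ (d : Int) - 1 then
            (mpos : Int) * mpos + 2 * mpos + 1 - j else g i j),
          mpos * mpos + 2 * mpos + 1) := by
  intro d
  induction d with
  | zero =>
    intro _ g
    rw [solveLoopC, if_neg (by omega)]
    refine Prod.ext ?_ (by simp; omega)
    exact (mkMat_congr (by intro i hi j hj; rw [if_neg (by omega)])).symm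
  | succ d ih =>
    intro hdm g
    rw [solveLoopC, if_pos (by omega)]
    have hcn : ((d : Int) + 1 - 1).toNat = d := by omega
    have hlp : mpos * mpos + mpos + 1 + (mpos - (d + 1)) < N.toNat * N.toNat := by
      subst hn
      have key : (mpos + 1) * (mpos + 1) ≤ N.toNat * N.toNat :=
        Nat.mul_le_mul (by omega) (by omega)
      have e : (mpos + 1) * (mpos + 1) = mpos * mpos + 2 * mpos + 1 := by ring
      omega
    have hval := lget hN (k := mpos * mpos + mpos + 1 + (mpos - (d + 1))) hlp
    push_cast at hval ⊢
    rw [hcn, hval, setCell_mkMat (by omega) (by omega)]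
    have harith : mpos * mpos + mpos + 1 + (mpos - (d + 1)) + 1 =
        mpos * mpos + mpos + 1 + (mpos - d) := by omega
    rw [harith]
    have := ih (by omega) (fun i j => if i = mpos ∧ j = d then
      ((mpos * mpos + mpos + 1 + (mpos - (d + 1)) : Nat) : Int) + 1 else g i j)
    push_cast at this
    rw [show ((d : Int) + 1 - 1 - 1) = (d : Int) - 1 by ring, this]
    refine Prod.ext ?_ rfl
    apply mkMat_congr
    intro i hi j hj
    by_cases h1 : i = mpos ∧ (j : Int) ≤ (d : Int) - 1
    · rw [if_pos h1, if_pos (by omega)]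
    · rw [if_neg h1]
      by_cases h2 : i = mpos ∧ j = d
      · rw [if_pos h2, if_pos (by omega)]
        obtain ⟨rfl, rfl⟩ := h2
        omega
      · rw [if_neg h2, if_neg (by omega)]

theorem loopM_spec {N : Int} (hN : 0 < N) {n : Nat} (hn : n = N.toNat) :
    ∀ (e mpos : Nat), mpos + e = n →
      solveLoopM N (PySem.List.pyRange 1 (N * N + 1) 1) mpos
          (mkMat n (fun i j => if i < mpos ∧ j < mpos then fform i j else 0)) (mpos * mpos) =
        mkMat n fform := by
  intro e
  induction e with
  | zero =>
    intro mpos he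
    rw [solveLoopM, if_neg (by omega)]
    exact mkMat_congr (by intro i hi j hj; rw [if_pos (by omega)])
  | succ e ih =>
    intro mpos he
    have hm : mpos < n := by omega
    have hmN : (mpos : Int) < N := by omega
    rw [solveLoopM, if_pos hmN]
    simp only
    have h1 := loopR_spec hN hn hm (mpos + 1) 0
      (fun i j => if i < mpos ∧ j < mpos then fform i j else 0) (by omega)
    rw [Nat.add_zero] at h1
    rw [h1]
    beta_reduce
    have h2 := loopC_spec hN hn hm mpos le_rfl
      (fun i j => if 0 ≤ i ∧ i ≤ mpos ∧ j = mpos then (mpos : Int) * mpos + i + 1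
        else if i < mpos ∧ j < mpos then fform i j else 0)
    simp only [Nat.sub_self, Nat.add_zero] at h2
    rw [h2]
    have h3 : mkMat n (fun i j => if i = mpos ∧ (j : Int) ≤ (mpos : Int) - 1 then
          (mpos : Int) * mpos + 2 * mpos + 1 - j
        else if 0 ≤ i ∧ i ≤ mpos ∧ j = mpos then (mpos : Int) * mpos + i + 1
        else if i < mpos ∧ j < mpos then fform i j else 0) =
        mkMat n (fun i j => if i < mpos + 1 ∧ j < mpos + 1 then fform i j else 0) := by
      apply mkMat_congr
      intro i hi j hj
      by_cases hrow : i = mpos ∧ (j : Int) ≤ (mpos : Int) - 1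
      · rw [if_pos hrow, if_pos (by omega)]
        obtain ⟨rfl, hjj⟩ := hrow
        rw [fform, if_neg (by omega)]
      · rw [if_neg hrow]
        by_cases hcol : 0 ≤ i ∧ i ≤ mpos ∧ j = mpos
        · rw [if_pos hcol, if_pos (by omega)]
          obtain ⟨-, hii, rfl⟩ := hcol
          rw [fform, if_pos hii]
        · rw [if_neg hcol]
          by_cases hold : i < mpos ∧ j < mpos
          · rw [if_pos hold, if_pos (by omega)]
          · rw [if_neg hold, if_neg (by omega)]
    rw [h3]
    have harith : mpos * mpos + 2 * mpos + 1 = (mpos + 1) * (mpos + 1) := by ring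
    rw [harith]
    exact ih (mpos + 1) (by omega)

theorem alt_eq_mkMat (N : Int) : solve_alt N = mkMat N.toNat fform := by
  unfold solve_alt mkMat
  rw [PySem.List.pyRange_one]
  simp only [Int.sub_zero, List.map_map]
  apply List.map_congr_left
  intro r hr
  apply List.map_congr_left
  intro c hc
  simp only [Function.comp]
  rw [fform]
  split_ifs with h1 h2 h2
  · ring
  · omega
  · omega
  · ring

-- ===== VERDICT (by name: the statement is the Claim_ definition above) =====
theorem solve_spec : Claim_equal_solve := by
  intro N _
  unfold Spec_solve solve
  by_cases hN : 0 < N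
  · have h0 := loopM_spec hN (n := N.toNat) rfl N.toNat 0 (by omega)
    simp only [Nat.zero_mul] at h0
    rw [replicate_eq_mkMat,
      show mkMat N.toNat (fun _ _ => (0 : Int)) =
        mkMat N.toNat (fun i j => if i < 0 ∧ j < 0 then fform i j else 0) from
        mkMat_congr (by intro i hi j hj; rw [if_neg (by omega)]),
      h0, alt_eq_mkMat N]
  · have hn : N.toNat = 0 := by omega
    rw [hn]
    rw [solveLoopM, if_neg (by omega)]
    unfold solve_alt
    rw [PySem.List.pyRange_one_eq_nil (by omega)]
    rfl
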